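-- pv_equiv track=rewrite | github.com/GaetanLepage/compound-figure-separator | compfigsep/utils/figure/label_class.py | map_label
-- ===== SOURCE A (Python) =====
-- def map_label(char: str) -> str:
--     """
--     Map the provided character to the right class.
--
--     Args:
--         char (str): A character [0-9][a-z][A-Z].
--
--     Returns:
--         char_class (str):   The class to which belongs the character.
--     """
--     assert len(char) == 1, f"Char should be of length 1: {char}"
--
--     char_classes = [
--         ('c', 'C'),
--         ('k', 'K'),
--         ('o', 'O'),
--         ('p', 'P'),
--         ('s', 'S'),
--         ('u', 'U'),
--         ('v', 'V'),
--         ('w', 'W'),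
--         ('x', 'X'),
--         ('y', 'Y'),
--         ('z', 'Z')]
--
--     # If the characetr is from a two characters class, return the upper-case one
--     for char_class in char_classes:
--         if char in char_class:
--             return char_class[1]
--
--     # If the character is from a single character class, we return it
--     return char
-- ===== SOURCE B (Python) =====
-- _TWO_CHAR_CLASSES = set('ckopsuvwxyz')
--
--
-- def map_label(char: str) -> str:
--     """
--     Map the provided character to the right class.
--
--     Args:
--         char (str): A character [0-9][a-z][A-Z].
--
--     Returns:
--         char_class (str):   The class to which belongs the character.
--     """
--     assert len(char) == 1, f"Char should be of length 1: {char}"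
--
--     # Letters with a merged two-character class map to their upper-case form.
--     if char.lower() in _TWO_CHAR_CLASSES:
--         return char.upper()
--
--     # Any other character is its own class.
--     return char
-- ===== Notes on version B (the rewrite author's own statement) =====
-- stated objective: idiomatic
-- what changed: Replaces the scan over stored (lower,upper) pairs with canonicalisation via .lower(), one set-membership test, and .upper() to produce the result, eliminating the loop and the paired table.
import Mathlib
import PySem

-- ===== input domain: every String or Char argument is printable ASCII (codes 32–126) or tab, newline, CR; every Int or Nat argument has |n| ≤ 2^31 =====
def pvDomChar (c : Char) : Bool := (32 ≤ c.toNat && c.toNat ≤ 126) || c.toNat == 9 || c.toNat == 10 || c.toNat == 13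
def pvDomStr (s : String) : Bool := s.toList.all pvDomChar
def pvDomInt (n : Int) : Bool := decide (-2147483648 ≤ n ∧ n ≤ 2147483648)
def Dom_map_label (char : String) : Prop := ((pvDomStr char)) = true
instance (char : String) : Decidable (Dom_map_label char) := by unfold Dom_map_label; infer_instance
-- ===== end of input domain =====

-- B is the idiomatic form: lower-case the character, test membership in the set of
-- eleven merged-class letters, and return char.upper() there, char otherwise.

-- ===== PORT A =====
-- the literal (lower, upper) pair table of A
def pvCharClasses : List (String × String) :=
  [("c", "C"), ("k", "K"), ("o", "O"), ("p", "P"), ("s", "S"), ("u", "U"),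
   ("v", "V"), ("w", "W"), ("x", "X"), ("y", "Y"), ("z", "Z")]

-- the for-loop with early return: first pair whose tuple contains char, else char
def map_label (char : String) : String :=
  match pvCharClasses.find? (fun cc => char == cc.1 || char == cc.2) with
  | some cc => cc.2
  | none => char

-- ===== PORT B =====
-- set('ckopsuvwxyz')
def pvTwoCharClasses : PySem.Set String :=
  PySem.Set.ofList ["c", "k", "o", "p", "s", "u", "v", "w", "x", "y", "z"]

def map_label_alt (char : String) : String :=
  if PySem.Set.contains pvTwoCharClasses (PySem.Str.lower char) then
    PySem.Str.upper char
  else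
    char

-- ===== PRECONDITION & SPEC =====
-- Pre_ excludes exactly the inputs on which A's assert raises AssertionError: len(char) ≠ 1.
def Pre_map_label (char : String) : Prop := PySem.Str.len char = 1
instance (char : String) : Decidable (Pre_map_label char) := by unfold Pre_map_label; infer_instance
def pvWitness_map_label : String := "a"

def Spec_map_label (char : String) (out : String) : Prop := out = map_label_alt char
instance (char : String) (out : String) : Decidable (Spec_map_label char out) := by unfold Spec_map_label; infer_instance

-- ===== CLAIM (what is proved, stated in full; the proofs are below) =====
def Claim_equal_map_label : Prop := ∀ (char : String), Dom_map_label char → Pre_map_label char → Spec_map_label char (map_label char)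

-- ===== LEMMAS AND PROOFS =====

-- all characters of the input domain with code < 128 (tab/newline/CR/printable all lie below 127)
def pvAllDomChars : List Char := (List.range 128).map Char.ofNat

lemma pv_mem_allDomChars (c : Char) (h : pvDomChar c = true) : c ∈ pvAllDomChars := by
  have hlt : c.toNat < 128 := by
    simp [pvDomChar] at h
    omega
  have hc : Char.ofNat c.toNat = c := Char.ofNat_toNat c
  exact hc ▸ List.mem_map_of_mem (List.mem_range.mpr hlt)

lemma pv_all_bool :
    pvAllDomChars.all
      (fun c => map_label (String.ofList [c]) == map_label_alt (String.ofList [c])) = true := by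
  decide

lemma pv_single : ∀ c ∈ pvAllDomChars,
    map_label (String.ofList [c]) = map_label_alt (String.ofList [c]) := by
  intro c hc
  exact eq_of_beq (List.all_eq_true.mp pv_all_bool c hc)

theorem map_label_spec : Claim_equal_map_label := by
  intro char hdom hpre
  have hlen : char.toList.length = 1 := by
    have := hpre
    simp only [Pre_map_label, PySem.Str.len] at this
    omega
  obtain ⟨c, hc⟩ := List.length_eq_one_iff.mp hlen
  have hchar : char = String.ofList [c] := by rw [← hc, String.ofList_toList]
  have hd : pvDomChar c = true := by
    have := hdom
    simp [Dom_map_label, pvDomStr, hc] at this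
    exact this
  simpa [Spec_map_label, hchar] using pv_single c (pv_mem_allDomChars c hd)
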